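-- pv_equiv track=rewrite | github.com/KasperGoes/Blufpoker | utils.py | ranks_3_dice
-- ===== SOURCE A (Python) =====
-- def create_ranks(array):
--
--     arrayint = [int(''.join(map(str, sorted(i, reverse=True)))) for i in array]
--     ranking_dict = {}
--     for tuple_value in array:
--
--         counter = 0
--         integer = int(''.join(map(str, sorted(tuple_value, reverse=True))))
--         for number in arrayint:
--             if integer > number:
--                 counter+=1
--         ranking_dict[tuple_value] = counter
--
--     return ranking_dict
--
-- def ranks_3_dice(hastoinclude_value=()):
--
--     #we create an array with all possibilities
--     possible_throws = []
--     for i in range(1, 7):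
--         for j in range(1,7):
--             for k in range(1,7):
--                 possible_throws.append((i,j,k))
--
--     if hastoinclude_value is not ():
--
--         #our throw has to have some dice, so we can throw out all possibilities without these dice,
--         #we also
--         remaining_possibble_throws = [tup for tup in possible_throws if all(num in tup for num in hastoinclude_value)]
--         remaining_possibble_throws_with_rankings  = create_ranks(remaining_possibble_throws)
--     else:
--
--         #our throw does not need to include any dice, so we just use to total array
--         remaining_possibble_throws_with_rankings  = create_ranks(possible_throws)
--
--     return remaining_possibble_throws_with_rankings
-- ===== SOURCE B (Python) =====
-- def _encode(throw):
--     lo, mid, hi = sorted(throw)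
--     return 100 * hi + 10 * mid + lo
--
-- def _bisect_left(a, x):
--     # bisect.bisect_left, written out to avoid an import
--     lo, hi = 0, len(a)
--     while lo < hi:
--         mid = (lo + hi) // 2
--         if a[mid] < x:
--             lo = mid + 1
--         else:
--             hi = mid
--     return lo
--
-- def ranks_3_dice(hastoinclude_value=()):
--     throws = [(i, j, k)
--               for i in range(1, 7) for j in range(1, 7) for k in range(1, 7)
--               if all(num in (i, j, k) for num in hastoinclude_value)]
--     encs = [_encode(t) for t in throws]
--     ordered = sorted(encs)
--     return {t: _bisect_left(ordered, e) for t, e in zip(throws, encs)}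
-- ===== Notes on version B (the rewrite author's own statement) =====
-- stated objective: alternative
-- what changed: B sorts the encoded throws once and binary-searches (a hand-written bisect_left) each throw's rank instead of A's per-throw linear scan over all encodings, and encodes a throw arithmetically from its three sorted dice instead of A's str/join/int round-trip; the ranking stage is O(n log n) vs O(n^2), but total runtime is dominated by filtering the fixed 216 throws, so no overall speed-up is claimed.
import Mathlib
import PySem

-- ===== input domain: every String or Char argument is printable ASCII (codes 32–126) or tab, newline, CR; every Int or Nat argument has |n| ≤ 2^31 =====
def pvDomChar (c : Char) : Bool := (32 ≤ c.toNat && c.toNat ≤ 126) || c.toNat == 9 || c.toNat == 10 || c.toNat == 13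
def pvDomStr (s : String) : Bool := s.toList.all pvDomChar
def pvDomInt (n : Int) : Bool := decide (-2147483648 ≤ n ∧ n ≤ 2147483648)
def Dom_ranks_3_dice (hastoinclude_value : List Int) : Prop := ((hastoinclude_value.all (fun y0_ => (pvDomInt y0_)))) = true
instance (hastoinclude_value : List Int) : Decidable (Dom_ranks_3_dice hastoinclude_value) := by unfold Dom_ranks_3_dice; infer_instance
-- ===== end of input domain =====

-- B replaces A's per-throw linear scan over all encoded throws by sorting the encodings once and
-- binary-searching (bisect_left) each throw's rank, and encodes a throw arithmetically instead of
-- via the string round-trip (objective: alternative algorithm; no overall speed-up is claimed).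

-- ===== PORT A =====
-- int(''.join(map(str, sorted(i, reverse=True)))); '.getD 0' is exact here: this is only applied to
-- nonempty lists of dice digits 1..6, so the joined string is a nonempty digit string and int() never raises
def pvStrEnc (i : List Int) : Int :=
  (PySem.Int.ofStr? (PySem.Str.join "" ((PySem.List.sorted i (fun x => x) true).map PySem.Int.toStr))).getD 0

def create_ranks (array : List (List Int)) : PySem.Dict (List Int) Int :=
  let arrayint := array.map (fun i => pvStrEnc i)
  array.foldl (fun ranking_dict tuple_value =>
    let integer := pvStrEnc tuple_value
    let counter := arrayint.foldl (fun counter number =>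
      if integer > number then counter + 1 else counter) (0 : Int)
    ranking_dict.insert tuple_value counter) PySem.Dict.empty

def ranks_3_dice (hastoinclude_value : List Int) : List (List Int × Int) :=
  let possible_throws := (PySem.List.pyRange 1 7 1).foldl (fun acc i =>
    (PySem.List.pyRange 1 7 1).foldl (fun acc j =>
      (PySem.List.pyRange 1 7 1).foldl (fun acc k => acc ++ [[i, j, k]]) acc) acc) []
  -- 'hastoinclude_value is not ()' is True for every list argument (a list is never the tuple ()),
  -- so with a list argument A always takes the filtering branch
  let remaining_possibble_throws := possible_throws.filter
    (fun tup => hastoinclude_value.all (fun num => decide (num ∈ tup)))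
  (create_ranks remaining_possibble_throws).items

-- ===== PORT B =====
-- lo, mid, hi = sorted(throw); the '_ => 0' arm is unreachable: every throw is a 3-dice list
def pvEncode (throw : List Int) : Int :=
  match PySem.List.sorted throw (fun x => x) with
  | [lo, mid, hi] => 100 * hi + 10 * mid + lo
  | _ => 0

-- _bisect_left in Source B is bisect.bisect_left written out verbatim = PySem.List.bisectLeft
def ranks_3_dice_alt (hastoinclude_value : List Int) : List (List Int × Int) :=
  let throws := (PySem.List.pyRange 1 7 1).flatMap (fun i =>
    (PySem.List.pyRange 1 7 1).flatMap (fun j =>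
      (PySem.List.pyRange 1 7 1).flatMap (fun k =>
        if hastoinclude_value.all (fun num => decide (num ∈ ([i, j, k] : List Int)))
        then [[i, j, k]] else [])))
  let encs := throws.map (fun t => pvEncode t)
  let ordered := PySem.List.sorted encs (fun x => x)
  ((throws.zip encs).foldl (fun d te =>
    d.insert te.1 ((PySem.List.bisectLeft ordered te.2 : Nat) : Int)) PySem.Dict.empty).items

-- ===== PRECONDITION & SPEC =====
def Spec_ranks_3_dice (hastoinclude_value : List Int) (out : List (List Int × Int)) : Prop := out = ranks_3_dice_alt hastoinclude_value
instance (hastoinclude_value : List Int) (out : List (List Int × Int)) : Decidable (Spec_ranks_3_dice hastoinclude_value out) := by unfold Spec_ranks_3_dice; infer_instance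

-- ===== CLAIM (what is proved, stated in full; the proofs are below) =====
def Claim_equal_ranks_3_dice : Prop := ∀ (hastoinclude_value : List Int), Dom_ranks_3_dice hastoinclude_value → Spec_ranks_3_dice hastoinclude_value (ranks_3_dice hastoinclude_value)

-- ===== LEMMAS AND PROOFS =====

-- the 216 possible throws, in generation order
def pvL : List Int := PySem.List.pyRange 1 7 1
def pvAll : List (List Int) := pvL.flatMap (fun i => pvL.flatMap (fun j => pvL.map (fun k => [i, j, k])))

-- the filter predicate both programs use
def pvP (h : List Int) : List Int → Bool := fun tup => h.all (fun num => decide (num ∈ tup))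

set_option maxRecDepth 100000 in
lemma pvAll_nodup : pvAll.Nodup := by decide

set_option maxRecDepth 100000 in
lemma pvEnc_eq : ∀ t ∈ pvAll, pvStrEnc t = pvEncode t := by
  have h : pvAll.all (fun t => pvStrEnc t == pvEncode t) = true := by decide
  intro t ht
  exact beq_iff_eq.mp (List.all_eq_true.mp h t ht)

set_option maxRecDepth 100000 in
lemma pvA_possible :
    ((PySem.List.pyRange 1 7 1).foldl (fun acc i =>
      (PySem.List.pyRange 1 7 1).foldl (fun acc j =>
        (PySem.List.pyRange 1 7 1).foldl (fun acc k => acc ++ [[i, j, k]]) acc) acc)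
      ([] : List (List Int))) = pvAll := by decide

lemma pvFlatMap_if_singleton {α β : Type} (p : β → Bool) (f : α → β) (l : List α) :
    l.flatMap (fun x => if p (f x) then [f x] else []) = (l.map f).filter p := by
  induction l with
  | nil => rfl
  | cons x xs ih =>
    simp only [List.flatMap_cons, List.map_cons, List.filter_cons]
    cases hp : p (f x) <;> simp [ih]

lemma pvB_throws (h : List Int) :
    ((PySem.List.pyRange 1 7 1).flatMap (fun i =>
      (PySem.List.pyRange 1 7 1).flatMap (fun j =>
        (PySem.List.pyRange 1 7 1).flatMap (fun k =>
          if h.all (fun num => decide (num ∈ ([i, j, k] : List Int)))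
          then [[i, j, k]] else [])))) = pvAll.filter (pvP h) := by
  simp only [pvAll, pvL, List.filter_flatMap]
  simp only [pvFlatMap_if_singleton (fun tup => h.all (fun num => decide (num ∈ tup)))
    (fun k => _)]
  rfl

-- bisect_left on a sorted list is the number of strictly smaller elements
lemma pvBisect_eq_countP (s : List Int) (x : Int) (hs : s.Pairwise (· ≤ ·)) :
    PySem.List.bisectLeft s x = s.countP (fun y => decide (y < x)) := by
  obtain ⟨hle, hlt, hge⟩ := PySem.List.bisectLeft_spec s x hs
  set b := PySem.List.bisectLeft s x with hb
  have h1 : (s.take b).countP (fun y => decide (y < x)) = b := by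
    rw [List.countP_eq_length.mpr, List.length_take, Nat.min_eq_left hle]
    intro a ha
    obtain ⟨j, hj, rfl⟩ := List.mem_iff_getElem.mp ha
    have hjb : j < b := lt_of_lt_of_le hj (by simp [List.length_take])
    have hjs : j < s.length := lt_of_lt_of_le hjb hle
    rw [List.getElem_take]
    exact decide_eq_true (hlt j hjs hjb)
  have h2 : (s.drop b).countP (fun y => decide (y < x)) = 0 := by
    rw [List.countP_eq_zero]
    intro a ha
    obtain ⟨j, hj, rfl⟩ := List.mem_iff_getElem.mp ha
    rw [List.getElem_drop]
    have hbj : b + j < s.length := by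
      have := List.length_drop (l := s) (i := b); omega
    simp only [decide_eq_true_eq]
    exact not_lt.mpr (hge (b + j) hbj (Nat.le_add_right b j))
  conv_rhs => rw [← List.take_append_drop b s]
  rw [List.countP_append, h1, h2]
  omega

lemma pvItems_fold (l : List (List Int)) (v : List Int → Int) (hnd : l.Nodup) :
    (l.foldl (fun d a => d.insert a (v a)) PySem.Dict.empty).items
      = l.map (fun a => (a, v a)) := by
  have := PySem.Dict.items_foldl_insert_fresh l (fun a => a) v PySem.Dict.empty
    (by intro a _; simp [PySem.Dict.contains_empty]) (by simpa using hnd)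
  simpa using this

lemma pvItems_fold_pairs (l : List (List Int × Int)) (v : List Int × Int → Int)
    (hnd : (l.map (·.1)).Nodup) :
    (l.foldl (fun d te => d.insert te.1 (v te)) PySem.Dict.empty).items
      = l.map (fun te => (te.1, v te)) := by
  have := PySem.Dict.items_foldl_insert_fresh l (·.1) v PySem.Dict.empty
    (by intro a _; simp [PySem.Dict.contains_empty]) hnd
  simpa using this

lemma pvRanks_eq (h : List Int) : ranks_3_dice h = ranks_3_dice_alt h := by
  have hthr_nd : (pvAll.filter (pvP h)).Nodup := List.Nodup.filter _ pvAll_nodup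
  have henc : ∀ u ∈ pvAll.filter (pvP h), pvStrEnc u = pvEncode u :=
    fun u hu => pvEnc_eq u (List.mem_of_mem_filter hu)
  have hmaps : (pvAll.filter (pvP h)).map (fun i => pvStrEnc i)
      = (pvAll.filter (pvP h)).map (fun t => pvEncode t) := List.map_congr_left henc
  have hzip : (pvAll.filter (pvP h)).zip ((pvAll.filter (pvP h)).map (fun t => pvEncode t))
      = (pvAll.filter (pvP h)).map (fun t => (t, pvEncode t)) := by
    have := List.zip_map' (f := id) (g := fun t => pvEncode t) (l := pvAll.filter (pvP h))
    simpa using this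
  have hordered : (PySem.List.sorted ((pvAll.filter (pvP h)).map (fun t => pvEncode t))
      (fun x => x)).Pairwise (· ≤ ·) := by
    simpa using PySem.List.sorted_pairwise ((pvAll.filter (pvP h)).map (fun t => pvEncode t))
      (fun x => x)
  have hperm := PySem.List.sorted_perm ((pvAll.filter (pvP h)).map (fun t => pvEncode t))
    (fun x => x) false
  -- evaluate A
  unfold ranks_3_dice create_ranks
  simp only [pvA_possible]
  rw [show (pvAll.filter (fun tup => h.all (fun num => decide (num ∈ tup))))
      = pvAll.filter (pvP h) from rfl, pvItems_fold _ _ hthr_nd]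
  -- evaluate B
  unfold ranks_3_dice_alt
  simp only [pvB_throws h, hzip]
  rw [pvItems_fold_pairs _ _ (by simpa [Function.comp_def] using hthr_nd), List.map_map]
  -- pointwise agreement of the two rank values
  apply List.map_congr_left
  intro t ht
  simp only [Function.comp_apply]
  refine Prod.ext rfl ?_
  show ((pvAll.filter (pvP h)).map (fun i => pvStrEnc i)).foldl
      (fun counter number => if pvStrEnc t > number then counter + 1 else counter) (0 : Int)
    = ((PySem.List.bisectLeft (PySem.List.sorted ((pvAll.filter (pvP h)).map (fun t => pvEncode t))
        (fun x => x)) (pvEncode t) : Nat) : Int)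
  rw [PySem.List.foldl_ite_add_one (fun number => pvStrEnc t > number)]
  rw [pvBisect_eq_countP _ _ hordered, hperm.countP_eq, ← hmaps, ← henc t ht]
  simp [gt_iff_lt]

-- ===== VERDICT (by name: the statement is the Claim_ definition above) =====
theorem ranks_3_dice_spec : Claim_equal_ranks_3_dice := by
  intro h _
  unfold Spec_ranks_3_dice
  exact pvRanks_eq h
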